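-- pv_equiv track=rewrite | github.com/ababar-usc/golay | golay.py | gen_all_stabs
-- ===== SOURCE A (Python) =====
-- def gen_all_stabs(stabs):
--     all_stabs = set(stabs)
--     for stab1 in stabs:
--         new_stabs = set()
--         for stab2 in all_stabs:
--             new_stabs.add(stab1 ^ stab2)
--         all_stabs |= new_stabs
--     return all_stabs
-- ===== SOURCE B (Python) =====
-- def gen_all_stabs(stabs):
--     out = list(dict.fromkeys(stabs))
--     seen = set(out)
--     span = {0}
--     for s in stabs:
--         if s in span:
--             continue
--         span |= {s ^ v for v in span}
--         for x in list(out):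
--             v = s ^ x
--             if v not in seen:
--                 seen.add(v)
--                 out.append(v)
--     return seen
-- ===== Notes on version B (the rewrite author's own statement) =====
-- stated objective: faster
-- what changed: B keeps a separately-doubled span of the basis processed so far and skips every generator already in that span, so only rank-many passes extend the output (tracked with an append list + membership set) instead of A's k full set-rebuild-and-union passes.
import Mathlib
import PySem

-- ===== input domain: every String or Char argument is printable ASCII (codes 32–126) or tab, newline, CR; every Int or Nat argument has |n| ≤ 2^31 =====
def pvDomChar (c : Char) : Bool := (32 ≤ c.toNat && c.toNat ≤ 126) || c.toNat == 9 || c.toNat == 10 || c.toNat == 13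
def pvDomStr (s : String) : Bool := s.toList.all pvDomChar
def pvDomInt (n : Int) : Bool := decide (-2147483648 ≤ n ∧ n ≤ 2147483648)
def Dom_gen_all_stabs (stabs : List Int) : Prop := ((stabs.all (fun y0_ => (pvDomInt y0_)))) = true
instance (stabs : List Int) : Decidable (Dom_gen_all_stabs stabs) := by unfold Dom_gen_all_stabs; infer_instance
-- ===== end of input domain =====

-- B computes the same XOR-closure but skips every generator already in the span of the processed
-- basis (tracked by a separately doubled span set), so only rank-many passes extend the result.

-- ===== PORT A =====
def gen_all_stabs (stabs : List Int) : List Int :=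
  stabs.foldl
    (fun all_stabs stab1 =>
      PySem.Set.union all_stabs
        (List.foldl (fun new_stabs stab2 => PySem.Set.add new_stabs (PySem.Int.bxor stab1 stab2))
          PySem.Set.empty all_stabs))
    (PySem.Set.ofList stabs)

-- ===== PORT B =====
def gen_all_stabs_alt (stabs : List Int) : List Int :=
  (stabs.foldl
    (fun (st : List Int × List Int × List Int) s =>
      if PySem.Set.contains st.2.2 s then st
      else
        let q := List.foldl
            (fun (p : List Int × List Int) x =>
              if PySem.Set.contains p.2 (PySem.Int.bxor s x) then p
              else (p.1 ++ [PySem.Int.bxor s x], PySem.Set.add p.2 (PySem.Int.bxor s x)))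
            (st.1, st.2.1) st.1
        (q.1, q.2, PySem.Set.union st.2.2 (PySem.Set.ofList (st.2.2.map (fun v => PySem.Int.bxor s v)))))
    (PySem.List.dedup stabs, PySem.Set.ofList (PySem.List.dedup stabs),
      PySem.Set.ofList [(0 : Int)])).2.1

-- ===== PRECONDITION & SPEC =====
def Spec_gen_all_stabs (stabs : List Int) (out : List Int) : Prop := out = gen_all_stabs_alt stabs
instance (stabs : List Int) (out : List Int) : Decidable (Spec_gen_all_stabs stabs out) := by unfold Spec_gen_all_stabs; infer_instance

-- ===== CLAIM (what is proved, stated in full; the proofs are below) =====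
def Claim_equal_gen_all_stabs : Prop := ∀ (stabs : List Int), Dom_gen_all_stabs stabs → Spec_gen_all_stabs stabs (gen_all_stabs stabs)

-- ===== LEMMAS AND PROOFS =====

-- Python ints as XOR vectors: sign bit × magnitude pattern (two's complement encoding).
def pvDec (p : Bool × Nat) : Int := if p.1 then -(p.2 : Int) - 1 else (p.2 : Int)

lemma pvDec_bxor (p q : Bool × Nat) :
    PySem.Int.bxor (pvDec p) (pvDec q) = pvDec (xor p.1 q.1, p.2 ^^^ q.2) := by
  obtain ⟨b1, m⟩ := p; obtain ⟨b2, n⟩ := q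
  cases b1 <;> cases b2 <;>
      simp [pvDec, PySem.Int.bxor] <;>
    first
      | (intro h; exact absurd h (by omega))
      | rw [if_neg (by omega), if_neg (by omega)]

lemma pvDec_surj (a : Int) : ∃ p, pvDec p = a := by
  by_cases h : 0 ≤ a
  · exact ⟨(false, a.toNat), by simp [pvDec]; omega⟩
  · exact ⟨(true, (-a - 1).toNat), by simp [pvDec]; omega⟩

lemma pv_bxor_assoc (a b c : Int) :
    PySem.Int.bxor (PySem.Int.bxor a b) c = PySem.Int.bxor a (PySem.Int.bxor b c) := by
  obtain ⟨p, rfl⟩ := pvDec_surj a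
  obtain ⟨q, rfl⟩ := pvDec_surj b
  obtain ⟨r, rfl⟩ := pvDec_surj c
  simp [pvDec_bxor, Nat.xor_assoc]

lemma pv_bxor_zero_left (x : Int) : PySem.Int.bxor 0 x = x := by
  rw [PySem.Int.bxor_comm]; exact PySem.Int.bxor_zero x

lemma pv_bxor_left_comm (a b c : Int) :
    PySem.Int.bxor a (PySem.Int.bxor b c) = PySem.Int.bxor b (PySem.Int.bxor a c) := by
  rw [← pv_bxor_assoc, PySem.Int.bxor_comm a b, pv_bxor_assoc]

lemma pv_bxor_cancel (s w x : Int) :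
    PySem.Int.bxor (PySem.Int.bxor s w) (PySem.Int.bxor s x) = PySem.Int.bxor w x := by
  rw [PySem.Int.bxor_comm s w, pv_bxor_assoc w s (PySem.Int.bxor s x), ← pv_bxor_assoc s s x,
      PySem.Int.bxor_self, pv_bxor_zero_left]

-- Folding Set.add only ever appends novel elements.
lemma pv_foldl_add_prefix (xs : List Int) : ∀ b : List Int,
    ∃ r, List.foldl PySem.Set.add b xs = b ++ r := by
  induction xs with
  | nil => exact fun b => ⟨[], by simp⟩
  | cons x xs ih =>
    intro b
    by_cases hx : x ∈ b
    · obtain ⟨r, hr⟩ := ih b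
      exact ⟨r, by simpa [PySem.Set.add_of_mem hx] using hr⟩
    · obtain ⟨r, hr⟩ := ih (b ++ [x])
      exact ⟨x :: r, by simp [PySem.Set.add_of_not_mem hx, hr]⟩

lemma pv_foldl_add_subset : ∀ (b a : List Int), (∀ y ∈ b, y ∈ a) →
    List.foldl PySem.Set.add a b = a := by
  intro b
  induction b with
  | nil => intro a _; rfl
  | cons x b ih =>
    intro a h
    rw [List.foldl_cons, PySem.Set.add_of_mem (h x (List.mem_cons_self))]
    exact ih a (fun y hy => h y (List.mem_cons_of_mem _ hy))

lemma pv_mem_foldl_add (xs a : List Int) (y : Int) :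
    y ∈ List.foldl PySem.Set.add a xs ↔ y ∈ a ∨ y ∈ xs := by
  have := PySem.Set.mem_update a xs y
  simpa [PySem.Set.update] using this

-- Folding a set built from xs into a equals folding xs into a directly (A's build-then-union
-- pass versus B's direct append pass).
lemma pv_foldl_add_absorb (xs : List Int) : ∀ (a b : List Int), (∀ y ∈ b, y ∈ a) →
    List.foldl PySem.Set.add a (List.foldl PySem.Set.add b xs) = List.foldl PySem.Set.add a xs := by
  induction xs with
  | nil => intro a b h; exact pv_foldl_add_subset b a h
  | cons x xs ih =>
    intro a b h
    simp only [List.foldl_cons]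
    by_cases hxb : x ∈ b
    · rw [PySem.Set.add_of_mem hxb, PySem.Set.add_of_mem (h x hxb)]
      exact ih a b h
    · rw [PySem.Set.add_of_not_mem hxb]
      have hsub : ∀ y ∈ b ++ [x], y ∈ a ++ [x] := by
        intro y hy
        rcases List.mem_append.1 hy with h1 | h1
        · exact List.mem_append.2 (Or.inl (h y h1))
        · exact List.mem_append.2 (Or.inr h1)
      by_cases hxa : x ∈ a
      · rw [PySem.Set.add_of_mem hxa]
        refine ih a (b ++ [x]) ?_
        intro y hy
        rcases List.mem_append.1 hy with h1 | h1
        · exact h y h1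
        · simpa using (by simpa using h1 : y = x) ▸ hxa
      · rw [PySem.Set.add_of_not_mem hxa]
        obtain ⟨r, hr⟩ := pv_foldl_add_prefix xs (b ++ [x])
        have key := ih (a ++ [x]) (b ++ [x]) hsub
        rw [hr, List.foldl_append, pv_foldl_add_subset (b ++ [x]) (a ++ [x]) hsub] at key
        rw [hr, List.foldl_append]
        have h1 : List.foldl PySem.Set.add a (b ++ [x]) = a ++ [x] := by
          rw [List.foldl_append, pv_foldl_add_subset b a h, List.foldl_cons,
              PySem.Set.add_of_not_mem hxa, List.foldl_nil]
        rw [h1]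
        exact key

-- One pass of A: build the set of XORs, union it in.
def pvPassA (s : Int) (all : List Int) : List Int :=
  PySem.Set.union all
    (List.foldl (fun new_stabs stab2 => PySem.Set.add new_stabs (PySem.Int.bxor s stab2))
      PySem.Set.empty all)

-- One pass of B (the collapsed out/seen loop): append each novel XOR directly.
def pvPassB (s : Int) (out : List Int) : List Int :=
  List.foldl (fun o x => PySem.Set.add o (PySem.Int.bxor s x)) out out

-- One step of B's outer fold, as written in the port.
def pvBig (st : List Int × List Int × List Int) (s : Int) : List Int × List Int × List Int :=
  if PySem.Set.contains st.2.2 s then st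
  else
    let q := List.foldl
        (fun (p : List Int × List Int) x =>
          if PySem.Set.contains p.2 (PySem.Int.bxor s x) then p
          else (p.1 ++ [PySem.Int.bxor s x], PySem.Set.add p.2 (PySem.Int.bxor s x)))
        (st.1, st.2.1) st.1
    (q.1, q.2, PySem.Set.union st.2.2 (PySem.Set.ofList (st.2.2.map (fun v => PySem.Int.bxor s v))))

lemma pvPassB_eq (s : Int) (out : List Int) :
    pvPassB s out = List.foldl PySem.Set.add out (out.map (PySem.Int.bxor s)) := by
  rw [pvPassB, List.foldl_map]

lemma pvPassA_eq_passB (s : Int) (out : List Int) : pvPassA s out = pvPassB s out := by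
  rw [pvPassA, PySem.Set.union, PySem.Set.update, pvPassB_eq]
  rw [show List.foldl (fun ns x => PySem.Set.add ns (PySem.Int.bxor s x)) PySem.Set.empty out
      = List.foldl PySem.Set.add PySem.Set.empty (out.map (PySem.Int.bxor s)) from
      (List.foldl_map).symm]
  exact pv_foldl_add_absorb _ _ _ (by simp [PySem.Set.empty])

lemma pv_mem_passB (s : Int) (out : List Int) (y : Int) :
    y ∈ pvPassB s out ↔ y ∈ out ∨ ∃ x ∈ out, y = PySem.Int.bxor s x := by
  rw [pvPassB_eq, pv_mem_foldl_add]
  simp [List.mem_map, eq_comm]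

-- Invariant: the accumulated result is closed under XOR by every element of the span set.
def pvClosed (out span : List Int) : Prop := ∀ v ∈ span, ∀ x ∈ out, PySem.Int.bxor v x ∈ out

lemma pv_passB_of_closed (s : Int) (out : List Int)
    (h : ∀ x ∈ out, PySem.Int.bxor s x ∈ out) : pvPassB s out = out := by
  rw [pvPassB_eq]
  refine pv_foldl_add_subset _ _ ?_
  intro y hy
  obtain ⟨x, hx, rfl⟩ := List.mem_map.1 hy
  exact h x hx

lemma pv_closed_step (s : Int) (out span : List Int) (h : pvClosed out span) :
    pvClosed (pvPassB s out)
      (PySem.Set.union span (PySem.Set.ofList (span.map (fun v => PySem.Int.bxor s v)))) := by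
  intro v hv x hx
  rw [PySem.Set.mem_union] at hv
  rw [pv_mem_passB] at hx ⊢
  have hv' : v ∈ span ∨ ∃ w ∈ span, v = PySem.Int.bxor s w := by
    rcases hv with h1 | h1
    · exact Or.inl h1
    · right
      rw [PySem.Set.mem_ofList, List.mem_map] at h1
      obtain ⟨w, hw, rfl⟩ := h1
      exact ⟨w, hw, rfl⟩
  rcases hv' with h1 | ⟨w, hw, rfl⟩ <;> rcases hx with h2 | ⟨x0, hx0, rfl⟩
  · exact Or.inl (h v h1 x h2)
  · exact Or.inr ⟨PySem.Int.bxor v x0, h v h1 x0 hx0, pv_bxor_left_comm v s x0⟩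
  · exact Or.inr ⟨PySem.Int.bxor w x, h w hw x h2, pv_bxor_assoc s w x⟩
  · exact Or.inl (pv_bxor_cancel s w x0 ▸ h w hw x0 hx0)

-- B's inner out/seen pair loop collapses: both components stay the same list.
lemma pv_inner_collapse (s : Int) (xs : List Int) : ∀ o : List Int,
    List.foldl
      (fun (p : List Int × List Int) x =>
        if PySem.Set.contains p.2 (PySem.Int.bxor s x) then p
        else (p.1 ++ [PySem.Int.bxor s x], PySem.Set.add p.2 (PySem.Int.bxor s x)))
      (o, o) xs
    = (List.foldl (fun o x => PySem.Set.add o (PySem.Int.bxor s x)) o xs,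
       List.foldl (fun o x => PySem.Set.add o (PySem.Int.bxor s x)) o xs) := by
  induction xs with
  | nil => intro o; rfl
  | cons x xs ih =>
    intro o
    simp only [List.foldl_cons]
    by_cases hc : PySem.Set.contains o (PySem.Int.bxor s x)
    · rw [if_pos hc, PySem.Set.add_of_mem ((PySem.Set.contains_iff o _).1 hc)]
      exact ih o
    · have hnm : PySem.Int.bxor s x ∉ o := fun hm => hc ((PySem.Set.contains_iff o _).2 hm)
      rw [if_neg hc, PySem.Set.add_of_not_mem hnm]
      exact ih (o ++ [PySem.Int.bxor s x])

-- Main invariant: under pvClosed, B's fold tracks A's fold; skipped generators are no-ops for A.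
lemma pv_main (l : List Int) : ∀ (out span : List Int), pvClosed out span →
    List.foldl pvBig (out, out, span) l
      = (List.foldl (fun all s => pvPassA s all) out l,
         List.foldl (fun all s => pvPassA s all) out l,
         List.foldl
           (fun sp s =>
             if PySem.Set.contains sp s then sp
             else PySem.Set.union sp (PySem.Set.ofList (sp.map (fun v => PySem.Int.bxor s v))))
           span l) := by
  induction l with
  | nil => intro out span _; rfl
  | cons s l ih =>
    intro out span h
    simp only [List.foldl_cons]
    by_cases hc : PySem.Set.contains span s
    · have hs : s ∈ span := (PySem.Set.contains_iff span s).1 hc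
      have hnoop : pvPassA s out = out := by
        rw [pvPassA_eq_passB]
        exact pv_passB_of_closed s out (fun x hx => h s hs x hx)
      rw [show pvBig (out, out, span) s = (out, out, span) from by rw [pvBig]; exact if_pos hc,
          hnoop, if_pos hc]
      exact ih out span h
    · have hstep : pvBig (out, out, span) s
          = (pvPassB s out, pvPassB s out,
             PySem.Set.union span (PySem.Set.ofList (span.map (fun v => PySem.Int.bxor s v)))) := by
        rw [pvBig, if_neg hc]
        simp only [pv_inner_collapse s out out]
        rfl
      rw [hstep, pvPassA_eq_passB, if_neg hc]
      exact ih (pvPassB s out) _ (pv_closed_step s out span h)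

lemma pv_closed_init (out : List Int) : pvClosed out [(0 : Int)] := by
  intro v hv x hx
  have : v = 0 := by simpa using hv
  rw [this, pv_bxor_zero_left]
  exact hx

-- ===== VERDICT (by name: the statement is the Claim_ definition above) =====
theorem gen_all_stabs_spec : Claim_equal_gen_all_stabs := by
  intro stabs _
  unfold Spec_gen_all_stabs
  have hB : gen_all_stabs_alt stabs
      = (List.foldl pvBig (PySem.List.dedup stabs, PySem.Set.ofList (PySem.List.dedup stabs),
          PySem.Set.ofList [(0 : Int)]) stabs).2.1 := rfl
  have hA : gen_all_stabs stabs
      = List.foldl (fun all s => pvPassA s all) (PySem.Set.ofList stabs) stabs := rfl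
  rw [hA, hB, PySem.List.dedup_eq_ofList,
      PySem.Set.ofList_eq_self_of_nodup (PySem.Set.ofList stabs) (PySem.Set.nodup_ofList stabs),
      show PySem.Set.ofList [(0 : Int)] = [(0 : Int)] from rfl,
      pv_main stabs (PySem.Set.ofList stabs) [(0 : Int)] (pv_closed_init _)]
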